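-- pv_equiv track=rewrite | github.com/Alexthw46/Tesi | train_class_incremental.py | build_subset_indices
-- ===== SOURCE A (Python) =====
-- from typing import Dict, List, Optional, Sequence, Tuple
--
-- def build_subset_indices(
--     targets: Sequence[int],
--     class_ids: Sequence[int],
--     max_per_class: int = -1,
-- ) -> List[int]:
--     class_set = set(class_ids)
--     if max_per_class is None or max_per_class <= 0:
--         return [i for i, y in enumerate(targets) if int(y) in class_set]
--
--     counts = {c: 0 for c in class_set}
--     selected = []
--     for i, y in enumerate(targets):
--         yi = int(y)
--         if yi in class_set and counts[yi] < max_per_class: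
--             selected.append(i)
--             counts[yi] += 1
--     return selected
-- ===== SOURCE B (Python) =====
-- def build_subset_indices(targets, class_ids, max_per_class=-1):
--     buckets = {}
--     for i, y in enumerate(targets):
--         buckets.setdefault(int(y), []).append(i)
--     kept = []
--     for c in set(class_ids):
--         pos = buckets.get(c, [])
--         if max_per_class is not None and max_per_class > 0:
--             pos = pos[:max_per_class]
--         kept.extend(pos)
--     return sorted(kept)
-- ===== Notes on version B (the rewrite author's own statement) =====
-- stated objective: alternative
-- what changed: Replaced A's single stateful pass with a per-class counter dict by a group-then-select pipeline: one pass groups all target positions into per-class buckets, then each wanted class contributes its first max_per_class positions (all of them when uncapped), and the concatenation is sorted to restore ascending index order.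
import Mathlib
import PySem

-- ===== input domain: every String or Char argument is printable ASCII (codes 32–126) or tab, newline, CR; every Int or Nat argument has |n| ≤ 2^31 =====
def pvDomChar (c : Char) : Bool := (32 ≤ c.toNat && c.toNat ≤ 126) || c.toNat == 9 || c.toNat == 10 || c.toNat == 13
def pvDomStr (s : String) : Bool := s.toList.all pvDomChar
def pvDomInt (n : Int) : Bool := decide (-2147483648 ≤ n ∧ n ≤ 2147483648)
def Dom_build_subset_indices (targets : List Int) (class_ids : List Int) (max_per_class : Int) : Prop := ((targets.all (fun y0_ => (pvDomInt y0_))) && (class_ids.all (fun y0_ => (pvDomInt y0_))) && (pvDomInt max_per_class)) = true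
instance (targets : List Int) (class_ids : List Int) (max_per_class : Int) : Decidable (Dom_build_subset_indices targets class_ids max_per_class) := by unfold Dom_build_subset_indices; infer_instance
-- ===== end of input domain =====

-- B replaces A's single stateful counter-dict pass by a group-then-select pipeline: one pass
-- groups all positions into per-class buckets, each wanted class contributes its first
-- max_per_class positions (all when uncapped), and the concatenation is sorted — a different
-- decomposition, not claimed faster.


-- ===== PORT A =====
def build_subset_indices (targets : List Int) (class_ids : List Int) (max_per_class : Int) : List Int :=
  let class_set : PySem.Set Int := PySem.Set.ofList class_ids
  if max_per_class ≤ 0 then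
    -- [i for i, y in enumerate(targets) if int(y) in class_set]  (int(y) = y on Int)
    (PySem.List.enumerate targets 0).filterMap
      (fun p => if class_set.contains p.2 then some p.1 else none)
  else
    -- counts = {c: 0 for c in class_set}: the dict is only looked up afterwards, so set order is immaterial
    let counts : PySem.Dict Int Int :=
      class_set.foldl (fun d c => d.insert c 0) PySem.Dict.empty
    -- counts[yi]: the key is always present when accessed (guarded by membership), so getD 0 is exact
    ((PySem.List.enumerate targets 0).foldl
      (fun (st : PySem.Dict Int Int × List Int) p =>
        if class_set.contains p.2 ∧ st.1.getD p.2 0 < max_per_class then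
          (st.1.insert p.2 (st.1.getD p.2 0 + 1), st.2 ++ [p.1])
        else st)
      (counts, [])).2

-- ===== PORT B =====
def build_subset_indices_alt (targets : List Int) (class_ids : List Int) (max_per_class : Int) : List Int :=
  -- buckets.setdefault(int(y), []).append(i)  (int(y) = y on Int) == modify y [] (· ++ [i])
  let buckets : PySem.Dict Int (List Int) :=
    (PySem.List.enumerate (targets.map (fun y => y)) 0).foldl
      (fun d p => d.modify p.2 [] (fun l => l ++ [p.1])) PySem.Dict.empty
  -- for c in set(class_ids): … kept.extend(pos)  — the buckets are concatenated and then SORTED,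
  -- so the result does not depend on Python's set iteration order
  let kept : List Int := (PySem.Set.ofList class_ids).foldl
    (fun acc c =>
      let pos := buckets.getD c []
      let pos := if 0 < max_per_class then PySem.List.slice pos none (some max_per_class) else pos
      acc ++ pos) []
  PySem.List.sorted kept (fun x => x) false

-- ===== PRECONDITION & SPEC =====
def Spec_build_subset_indices (targets : List Int) (class_ids : List Int) (max_per_class : Int) (out : List Int) : Prop := out = build_subset_indices_alt targets class_ids max_per_class
instance (targets : List Int) (class_ids : List Int) (max_per_class : Int) (out : List Int) : Decidable (Spec_build_subset_indices targets class_ids max_per_class out) := by unfold Spec_build_subset_indices; infer_instance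

-- ===== CLAIM (what is proved, stated in full; the proofs are below) =====
def Claim_equal_build_subset_indices : Prop := ∀ (targets : List Int) (class_ids : List Int) (max_per_class : Int), Dom_build_subset_indices targets class_ids max_per_class → Spec_build_subset_indices targets class_ids max_per_class (build_subset_indices targets class_ids max_per_class)

-- ===== LEMMAS AND PROOFS =====

-- the initial dict {c: 0 for c in class_set} answers 0 on every key
lemma getD_init_zero (l : List Int) : ∀ (d : PySem.Dict Int Int),
    (∀ c, d.getD c 0 = 0) →
    ∀ c, (l.foldl (fun d c => d.insert c 0) d).getD c 0 = 0 := by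
  induction l with
  | nil => intro d h c; simp only [List.foldl_nil]; exact h c
  | cons x xs ih =>
    intro d h c
    simp only [List.foldl_cons]
    refine ih _ (fun c' => ?_) c
    by_cases hc : c' = x
    · subst hc; simp [PySem.Dict.getD_insert_self]
    · rw [PySem.Dict.getD_insert_of_ne _ _ _ hc]; exact h c'

-- A's counter loop, started after prefix `pre` with counts = min(count in pre, cap), is the
-- prefix-count filter over the remainder
lemma loop_eq (cs : PySem.Set Int) (mpc : Int) :
    ∀ (ts pre sel : List Int) (d : PySem.Dict Int Int),
    (∀ c, cs.contains c → d.getD c 0 = min ((pre.count c : Int)) mpc) →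
    ((PySem.List.enumerate ts (pre.length : Int)).foldl
      (fun (st : PySem.Dict Int Int × List Int) p =>
        if cs.contains p.2 ∧ st.1.getD p.2 0 < mpc then
          (st.1.insert p.2 (st.1.getD p.2 0 + 1), st.2 ++ [p.1])
        else st) (d, sel)).2
    = sel ++ (PySem.List.enumerate ts (pre.length : Int)).filterMap
        (fun p => if cs.contains p.2 ∧
            ((PySem.List.slice (pre ++ ts) none (some p.1)).count p.2 : Int) < mpc
          then some p.1 else none) := by
  intro ts
  induction ts with
  | nil => intro pre sel d hinv; simp [PySem.List.enumerate_nil]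
  | cons y rest ih =>
    intro pre sel d hinv
    rw [PySem.List.enumerate_cons]
    simp only [List.foldl_cons, List.filterMap_cons]
    have hslice : PySem.List.slice (pre ++ y :: rest) none (some ((pre.length : Nat) : Int)) = pre := by
      rw [PySem.List.slice_to_natCast]
      simp
    have happ : pre ++ y :: rest = (pre ++ [y]) ++ rest := by
      simp
    have hlen : (pre.length : Int) + 1 = (((pre ++ [y]).length : Nat) : Int) := by
      simp
    by_cases hy : (cs.contains y : Prop)
    · have hd := hinv y hy
      by_cases hcnt : ((pre.count y : Int)) < mpc
      · -- selected in both
        have hcond : cs.contains y ∧ d.getD y 0 < mpc := ⟨hy, by rw [hd]; omega⟩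
        rw [if_pos hcond, hslice, if_pos ⟨hy, hcnt⟩]
        have hinv' : ∀ c, cs.contains c →
            (d.insert y (d.getD y 0 + 1)).getD c 0 = min (((pre ++ [y]).count c : Int)) mpc := by
          intro c hc
          by_cases hcy : c = y
          · rw [hcy, PySem.Dict.getD_insert_self, hd]
            have hcnt' : (pre ++ [y]).count y = pre.count y + 1 := by simp
            rw [hcnt']; push_cast; omega
          · rw [PySem.Dict.getD_insert_of_ne _ _ _ hcy, hinv c hc]
            have hcy' : y ≠ c := fun h => hcy h.symm
            have hcnt' : (pre ++ [y]).count c = pre.count c := by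
              simp [List.count_append, hcy']
            rw [hcnt']
        rw [hlen, happ, ih (pre ++ [y]) (sel ++ [(pre.length : Int)]) _ hinv']
        simp
      · -- capped: skipped in both
        have hcond : ¬ (cs.contains y ∧ d.getD y 0 < mpc) := by
          rintro ⟨-, h2⟩; rw [hd] at h2; omega
        rw [if_neg hcond, hslice, if_neg (by rintro ⟨-, h2⟩; omega)]
        have hinv' : ∀ c, cs.contains c →
            d.getD c 0 = min (((pre ++ [y]).count c : Int)) mpc := by
          intro c hc
          by_cases hcy : c = y
          · rw [hcy, hd]
            have hcnt' : (pre ++ [y]).count y = pre.count y + 1 := by simp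
            rw [hcnt']; push_cast; omega
          · rw [hinv c hc]
            have hcy' : y ≠ c := fun h => hcy h.symm
            have hcnt' : (pre ++ [y]).count c = pre.count c := by
              simp [List.count_append, hcy']
            rw [hcnt']
        rw [hlen, happ, ih (pre ++ [y]) sel d hinv']
    · -- not in class set: skipped in both
      have hcond : ¬ (cs.contains y ∧ d.getD y 0 < mpc) := by rintro ⟨h1, -⟩; exact hy h1
      rw [if_neg hcond, hslice, if_neg (by rintro ⟨h1, -⟩; exact hy h1)]
      have hinv' : ∀ c, cs.contains c →
          d.getD c 0 = min (((pre ++ [y]).count c : Int)) mpc := by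
        intro c hc
        rw [hinv c hc]
        have hcy' : y ≠ c := fun h => hy (h ▸ hc)
        have hcnt' : (pre ++ [y]).count c = pre.count c := by
          simp [List.count_append, hcy']
        rw [hcnt']
      rw [hlen, happ, ih (pre ++ [y]) sel d hinv']

-- an index-filter over an enumerate list is strictly increasing
lemma pairwise_lt_filterMap_enumerate (ts : List Int) (s : Int) (f : Int × Int → Option Int)
    (hf : ∀ p x, f p = some x → x = p.1) :
    ((PySem.List.enumerate ts s).filterMap f).Pairwise (· < ·) := by
  refine List.pairwise_filterMap.mpr ?_
  refine (PySem.List.pairwise_lt_enumerate ts s).imp ?_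
  intro p q hpq x hx y hy
  rw [hf p x hx, hf q y hy]; exact hpq

-- picking the unique matching class out of a nodup class list inserts one element, up to permutation
lemma flatMap_pick (g : Int → List Int) (x a : Int) :
    ∀ (L : List Int), L.Nodup → a ∈ L →
    (L.flatMap (fun c => (if a = c then [x] else []) ++ g c)).Perm (x :: L.flatMap g) := by
  intro L
  induction L with
  | nil => intro _ h; cases h
  | cons c L' ih =>
    intro hnd hmem
    rcases List.nodup_cons.mp hnd with ⟨hc, hnd'⟩
    by_cases hac : a = c
    · have hskip : ∀ c' ∈ L', (fun c => (if a = c then [x] else []) ++ g c) c' = g c' := by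
        intro c' hc'
        have : a ≠ c' := fun h => hc (by rw [hac] at h; exact h ▸ hc')
        simp [this]
      rw [List.flatMap_cons, List.flatMap_congr hskip, if_pos hac]
      simp
    · rw [List.flatMap_cons, if_neg hac, List.nil_append]
      have hmem' : a ∈ L' := by
        cases hmem with
        | head => exact absurd rfl hac
        | tail _ h => exact h
      refine ((ih hnd' hmem').append_left (g c)).trans ?_
      rw [List.flatMap_cons]
      exact List.perm_middle

-- partitioning a guarded index-filter by the (nodup) class list, up to permutation
lemma perm_partition (Q : Int × Int → Prop) [DecidablePred Q] :
    ∀ (E : List (Int × Int)) (L : List Int), L.Nodup →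
    (E.filterMap (fun p => if p.2 ∈ L ∧ Q p then some p.1 else none)).Perm
      (L.flatMap (fun c => E.filterMap (fun p => if p.2 = c ∧ Q p then some p.1 else none))) := by
  intro E
  induction E with
  | nil => intro L _; simp
  | cons p E' ih =>
    intro L hnd
    have hstep : ∀ c, ((p :: E').filterMap (fun q => if q.2 = c ∧ Q q then some q.1 else none))
        = (if p.2 = c ∧ Q p then [p.1] else []) ++
          E'.filterMap (fun q => if q.2 = c ∧ Q q then some q.1 else none) := by
      intro c
      by_cases h : p.2 = c ∧ Q p <;> simp [List.filterMap_cons, h]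
    rw [List.filterMap_cons]
    have hflat : (L.flatMap (fun c => (p :: E').filterMap
          (fun q => if q.2 = c ∧ Q q then some q.1 else none)))
        = L.flatMap (fun c => (if p.2 = c ∧ Q p then [p.1] else []) ++
            E'.filterMap (fun q => if q.2 = c ∧ Q q then some q.1 else none)) :=
      List.flatMap_congr (fun c _ => hstep c)
    rw [hflat]
    by_cases hQ : Q p
    · by_cases hmem : p.2 ∈ L
      · rw [if_pos ⟨hmem, hQ⟩]
        have hsimp : (L.flatMap (fun c => (if p.2 = c ∧ Q p then [p.1] else []) ++
              E'.filterMap (fun q => if q.2 = c ∧ Q q then some q.1 else none)))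
            = L.flatMap (fun c => (if p.2 = c then [p.1] else []) ++
              E'.filterMap (fun q => if q.2 = c ∧ Q q then some q.1 else none)) := by
          simp only [hQ, and_true]
        rw [hsimp]
        exact ((ih L hnd).cons p.1).trans (flatMap_pick _ p.1 p.2 L hnd hmem).symm
      · rw [if_neg (by rintro ⟨h, -⟩; exact hmem h)]
        have hsimp : (L.flatMap (fun c => (if p.2 = c ∧ Q p then [p.1] else []) ++
              E'.filterMap (fun q => if q.2 = c ∧ Q q then some q.1 else none)))
            = L.flatMap (fun c =>
              E'.filterMap (fun q => if q.2 = c ∧ Q q then some q.1 else none)) := by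
          refine List.flatMap_congr (fun c hc => ?_)
          have : p.2 ≠ c := fun h => hmem (h ▸ hc)
          simp [this]
        rw [hsimp]
        exact ih L hnd
    · rw [if_neg (by rintro ⟨-, h⟩; exact hQ h)]
      have hsimp : (L.flatMap (fun c => (if p.2 = c ∧ Q p then [p.1] else []) ++
            E'.filterMap (fun q => if q.2 = c ∧ Q q then some q.1 else none)))
          = L.flatMap (fun c =>
            E'.filterMap (fun q => if q.2 = c ∧ Q q then some q.1 else none)) := by
        refine List.flatMap_congr (fun c _ => ?_)
        simp [hQ]
      rw [hsimp]
      exact ih L hnd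

-- the first (mpc - count in pre) positions of class c are exactly the positions whose
-- prefix count of c is still below the cap
lemma take_positions (c mpc : Int) :
    ∀ (ts pre : List Int),
    (((PySem.List.enumerate ts (pre.length : Int)).filterMap
        (fun p => if p.2 == c then some p.1 else none)).take (mpc - pre.count c).toNat)
    = (PySem.List.enumerate ts (pre.length : Int)).filterMap
        (fun p => if p.2 = c ∧ ((PySem.List.slice (pre ++ ts) none (some p.1)).count c : Int) < mpc
          then some p.1 else none) := by
  intro ts
  induction ts with
  | nil => intro pre; simp [PySem.List.enumerate_nil]
  | cons y rest ih =>
    intro pre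
    rw [PySem.List.enumerate_cons]
    simp only [List.filterMap_cons]
    have hslice : PySem.List.slice (pre ++ y :: rest) none (some ((pre.length : Nat) : Int)) = pre := by
      rw [PySem.List.slice_to_natCast]
      simp
    have happ : pre ++ y :: rest = (pre ++ [y]) ++ rest := by simp
    have hlen : (pre.length : Int) + 1 = (((pre ++ [y]).length : Nat) : Int) := by simp
    by_cases hy : y = c
    · rw [if_pos (by simp [hy]), hslice]
      by_cases hcnt : ((pre.count c : Int)) < mpc
      · rw [if_pos ⟨hy.symm ▸ rfl, hcnt⟩]
        have hc1 : (pre ++ [y]).count c = pre.count c + 1 := by simp [hy]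
        have hn : (mpc - pre.count c).toNat = (mpc - ((pre ++ [y]).count c : Int)).toNat + 1 := by
          rw [hc1]; push_cast; omega
        rw [hn, List.take_succ_cons, hlen, happ, ih (pre ++ [y])]
      · rw [if_neg (by rintro ⟨-, h⟩; omega)]
        have hn : (mpc - ((pre.count c : Int))).toNat = 0 := by omega
        have hc1 : (pre ++ [y]).count c = pre.count c + 1 := by simp [hy]
        have hn' : (mpc - (((pre ++ [y]).count c : Int))).toNat = 0 := by rw [hc1]; push_cast; omega
        rw [hn, List.take_zero, hlen, happ, ← ih (pre ++ [y]), hn', List.take_zero]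
    · rw [if_neg (by simp [hy]), hslice, if_neg (by rintro ⟨h, -⟩; exact hy h)]
      have hc1 : (pre ++ [y]).count c = pre.count c := by simp [List.count_append, hy]
      have hn : (mpc - ((pre.count c : Int))).toNat = (mpc - (((pre ++ [y]).count c : Int))).toNat := by
        rw [hc1]
      rw [hn, hlen, happ, ih (pre ++ [y])]

-- an index-filter written as filter-then-map
lemma filterMap_if_eq_filter_map (l : List (Int × Int)) (c : Int) :
    l.filterMap (fun p => if p.2 == c then some p.1 else none)
    = (l.filter (fun p => p.2 == c)).map (fun p => p.1) := by
  induction l with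
  | nil => simp
  | cons p t ih => by_cases h : p.2 = c <;> simp [List.filterMap_cons, List.filter_cons, h] <;> simpa using ih

-- the grouping pass: bucket c holds exactly the positions of class c, in order
lemma buckets_getD (targets : List Int) (c : Int) :
    ((PySem.List.enumerate targets 0).foldl
        (fun d p => d.modify p.2 [] (fun l => l ++ [p.1]))
        (PySem.Dict.empty : PySem.Dict Int (List Int))).getD c []
    = (PySem.List.enumerate targets 0).filterMap
        (fun p => if p.2 == c then some p.1 else none) := by
  rw [show (PySem.List.enumerate targets 0).foldl
        (fun d p => d.modify p.2 [] (fun l => l ++ [p.1]))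
        (PySem.Dict.empty : PySem.Dict Int (List Int))
      = ((PySem.List.enumerate targets 0).map (fun p => (p.2, p.1))).foldl
        (fun d p => d.modify p.1 [] (fun l => l ++ [p.2])) PySem.Dict.empty
    from by rw [List.foldl_map]]
  rw [PySem.Dict.getD_foldl_modify_append, filterMap_if_eq_filter_map, List.filter_map,
    List.map_map]
  simp [PySem.Dict.getD_empty, Function.comp_def]

-- ===== VERDICT (by name: the statement is the Claim_ definition above) =====
theorem build_subset_indices_spec : Claim_equal_build_subset_indices := by
  intro targets class_ids mpc _
  unfold Spec_build_subset_indices build_subset_indices build_subset_indices_alt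
  simp only [List.map_id']
  set cs : PySem.Set Int := PySem.Set.ofList class_ids with hcs
  have hnd : cs.Nodup := PySem.Set.nodup_ofList class_ids
  by_cases h : mpc ≤ 0
  · -- no-cap path
    rw [if_pos h]
    have hif : ¬ 0 < mpc := by omega
    simp only [hif, if_false]
    simp only [buckets_getD]
    rw [PySem.List.foldl_append_eq_flatMap
      (g := fun c => (PySem.List.enumerate targets 0).filterMap
        (fun p => if p.2 == c then some p.1 else none))]
    simp only [List.nil_append]
    refine (PySem.List.sorted_eq_of_perm_of_pairwise_lt _ _ (fun x : Int => x) ?_ ?_).symm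
    · -- A's list is a permutation of the concatenated buckets
      have e1 : (fun p : Int × Int => if cs.contains p.2 then some p.1 else none)
          = (fun p : Int × Int => if p.2 ∈ cs ∧ True then some p.1 else none) := by
        funext p
        by_cases hp : p.2 ∈ cs
        · simp [hp, List.contains_iff_mem]
        · simp [hp, fun hh => hp (List.contains_iff_mem.mp hh)]
      have e2 : ∀ c : Int, (fun p : Int × Int => if p.2 = c ∧ True then some p.1 else none)
          = (fun p : Int × Int => if p.2 == c then some p.1 else none) := by
        intro c; funext p
        by_cases hp : p.2 = c <;> simp [hp]
      simp only [e1]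
      have := perm_partition (fun _ => True) (PySem.List.enumerate targets 0) cs hnd
      simpa only [e2] using this
    · exact pairwise_lt_filterMap_enumerate targets 0 _
        (fun p x hx => by by_cases hp : (cs.contains p.2 : Prop) <;> simp [hp] at hx <;> omega)
  · -- capped path
    rw [if_neg h]
    have h0 : ∀ c, (cs.foldl (fun d c => d.insert c 0)
        (PySem.Dict.empty : PySem.Dict Int Int)).getD c 0 = 0 :=
      getD_init_zero _ _ (fun c => rfl)
    have hA := loop_eq cs mpc targets [] []
      (cs.foldl (fun d c => d.insert c 0) (PySem.Dict.empty : PySem.Dict Int Int))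
      (fun c _ => by rw [h0 c]; simp; omega)
    simp only [List.length_nil, Nat.cast_zero, List.nil_append] at hA
    rw [hA]
    have hif : 0 < mpc := by omega
    simp only [hif, if_true]
    simp only [buckets_getD]
    rw [PySem.List.foldl_append_eq_flatMap
      (g := fun c => PySem.List.slice ((PySem.List.enumerate targets 0).filterMap
        (fun p => if p.2 == c then some p.1 else none)) none (some mpc))]
    simp only [List.nil_append]
    refine (PySem.List.sorted_eq_of_perm_of_pairwise_lt _ _ (fun x : Int => x) ?_ ?_).symm
    · -- A's filter is a permutation of the concatenated capped buckets
      have ebucket : ∀ c : Int, PySem.List.slice ((PySem.List.enumerate targets 0).filterMap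
            (fun p => if p.2 == c then some p.1 else none)) none (some mpc)
          = (PySem.List.enumerate targets 0).filterMap
            (fun p => if p.2 = c ∧ ((PySem.List.slice targets none (some p.1)).count c : Int) < mpc
              then some p.1 else none) := by
        intro c
        rw [PySem.List.slice_to _ (by omega : (0:Int) ≤ mpc)]
        have := take_positions c mpc targets []
        simpa using this
      refine List.Perm.trans (l₂ := (PySem.List.enumerate targets 0).filterMap
          (fun p : Int × Int => if p.2 ∈ cs ∧
            ((PySem.List.slice targets none (some p.1)).count p.2 : Int) < mpc
            then some p.1 else none)) (List.Perm.of_eq (List.filterMap_congr ?_)) ?_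
      · intro p _
        by_cases hp : p.2 ∈ cs
        · by_cases hq : ((PySem.List.slice targets none (some p.1)).count p.2 : Int) < mpc <;>
            simp [List.contains_iff_mem, hp, hq]
        · simp [List.contains_iff_mem, hp]
      refine (perm_partition
        (fun p : Int × Int => ((PySem.List.slice targets none (some p.1)).count p.2 : Int) < mpc)
        (PySem.List.enumerate targets 0) cs hnd).trans ?_
      refine List.Perm.of_eq (List.flatMap_congr ?_)
      intro c _
      rw [ebucket c]
      refine List.filterMap_congr ?_
      intro p _
      by_cases hp : p.2 = c
      · rw [hp]
      · simp [hp]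
    · exact pairwise_lt_filterMap_enumerate targets 0 _
        (fun p x hx => by
          by_cases hp : cs.contains p.2 ∧
              ((PySem.List.slice targets none (some p.1)).count p.2 : Int) < mpc <;>
            simp [hp] at hx <;> omega)
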